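-- pv_equiv track=rewrite | github.com/salaschen/ACM | UVA/Liu/Chapter5_C++/230_Borrowers/sol.py | getBookBefore
-- ===== SOURCE A (Python) =====
-- def getBookBefore(bid, shelf):
-- 	beforeId = bid - 1 ;
-- 	while True:
-- 		if beforeId < 0:
-- 			return -1 ;
-- 		elif beforeId in shelf:
-- 			return beforeId ;
-- 		else:
-- 			beforeId -= 1 ;
-- 	return -1;
-- ===== SOURCE B (Python) =====
-- def getBookBefore(bid, shelf):
--     return max((x for x in shelf if 0 <= x < bid), default=-1)
-- ===== Notes on version B (the rewrite author's own statement) =====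
-- stated objective: alternative
-- what changed: Replace the countdown scan over the integer value range (testing each candidate for membership in shelf) by a single pass over shelf taking the maximum element in [0, bid), with default -1.
import Mathlib
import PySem

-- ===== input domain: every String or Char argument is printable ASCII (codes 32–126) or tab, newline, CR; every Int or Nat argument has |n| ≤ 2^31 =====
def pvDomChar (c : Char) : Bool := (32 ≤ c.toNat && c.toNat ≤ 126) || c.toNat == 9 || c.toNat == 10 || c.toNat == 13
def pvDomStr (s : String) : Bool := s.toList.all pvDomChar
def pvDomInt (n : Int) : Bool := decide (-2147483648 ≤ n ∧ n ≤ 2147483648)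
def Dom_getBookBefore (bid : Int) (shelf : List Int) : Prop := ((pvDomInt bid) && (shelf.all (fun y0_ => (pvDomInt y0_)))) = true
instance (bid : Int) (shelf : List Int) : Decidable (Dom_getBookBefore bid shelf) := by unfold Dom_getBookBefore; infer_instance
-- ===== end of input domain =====

-- B replaces A's countdown over the value range by one pass over shelf (max of the elements in [0, bid), default -1); objective: alternative (one pass over shelf instead of over the value range).

-- ===== PORT A =====
-- the 'while True' countdown loop of A, step for step
def getBookBeforeLoop (shelf : List Int) (beforeId : Int) : Int :=
  if beforeId < 0 then -1
  else if beforeId ∈ shelf then beforeId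
  else getBookBeforeLoop shelf (beforeId - 1)
termination_by (beforeId + 1).toNat
decreasing_by omega

def getBookBefore (bid : Int) (shelf : List Int) : Int :=
  getBookBeforeLoop shelf (bid - 1)

-- ===== PORT B =====
def getBookBefore_alt (bid : Int) (shelf : List Int) : Int :=
  ((PySem.List.max? (shelf.filter (fun x => decide (0 ≤ x) && decide (x < bid))) (fun y => y)).getD (-1))

-- ===== PRECONDITION & SPEC =====
def Spec_getBookBefore (bid : Int) (shelf : List Int) (out : Int) : Prop := out = getBookBefore_alt bid shelf
instance (bid : Int) (shelf : List Int) (out : Int) : Decidable (Spec_getBookBefore bid shelf out) := by unfold Spec_getBookBefore; infer_instance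

-- ===== CLAIM (what is proved, stated in full; the proofs are below) =====
def Claim_equal_getBookBefore : Prop := ∀ (bid : Int) (shelf : List Int), Dom_getBookBefore bid shelf → Spec_getBookBefore bid shelf (getBookBefore bid shelf)

-- ===== LEMMAS AND PROOFS =====

-- max? of a list whose member b is an upper bound is some b
theorem max?_eq_of_mem_of_isMax (xs : List Int) (b : Int)
    (hb : b ∈ xs) (hub : ∀ y ∈ xs, y ≤ b) :
    PySem.List.max? xs (fun y => y) = some b := by
  cases h : PySem.List.max? xs (fun y => y) with
  | none =>
      rw [PySem.List.max?_eq_none_iff] at h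
      subst h; simp at hb
  | some m =>
      have hm : m ∈ xs := PySem.List.max?_mem h
      have h1 : b ≤ m := PySem.List.max?_isMax h b hb
      have h2 : m ≤ b := hub m hm
      exact congrArg some (le_antisymm h2 h1)

theorem loop_eq_max (shelf : List Int) (b : Int) :
    getBookBeforeLoop shelf b
      = ((PySem.List.max? (shelf.filter (fun x => decide (0 ≤ x) && decide (x ≤ b))) (fun y => y)).getD (-1)) := by
  fun_induction getBookBeforeLoop shelf b with
  | case1 b hneg =>
      have : shelf.filter (fun x => decide (0 ≤ x) && decide (x ≤ b)) = [] := by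
        apply List.filter_eq_nil_iff.mpr
        intro x hx
        simp only [Bool.and_eq_true, decide_eq_true_eq, not_and]
        intro h0; omega
      simp [this, PySem.List.max?]
  | case2 b hneg hmem =>
      have hb : b ∈ shelf.filter (fun x => decide (0 ≤ x) && decide (x ≤ b)) := by
        simp only [List.mem_filter, Bool.and_eq_true, decide_eq_true_eq]
        exact ⟨hmem, by omega, le_refl b⟩
      have hub : ∀ y ∈ shelf.filter (fun x => decide (0 ≤ x) && decide (x ≤ b)), y ≤ b := by
        intro y hy
        simp only [List.mem_filter, Bool.and_eq_true, decide_eq_true_eq] at hy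
        exact hy.2.2
      rw [max?_eq_of_mem_of_isMax _ b hb hub]
      rfl
  | case3 b hneg hmem ih =>
      have hfe : shelf.filter (fun x => decide (0 ≤ x) && decide (x ≤ b))
          = shelf.filter (fun x => decide (0 ≤ x) && decide (x ≤ b - 1)) := by
        apply List.filter_congr
        intro x hx
        have hxb : x ≠ b := fun h => hmem (h ▸ hx)
        have hiff : (x ≤ b) = (x ≤ b - 1) := propext ⟨fun h => by omega, fun h => by omega⟩
        simp only [hiff]
      rw [hfe, ih]

theorem filter_lt_eq (bid : Int) (shelf : List Int) :
    shelf.filter (fun x => decide (0 ≤ x) && decide (x < bid))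
      = shelf.filter (fun x => decide (0 ≤ x) && decide (x ≤ bid - 1)) := by
  apply List.filter_congr
  intro x hx
  have hiff : (x < bid) = (x ≤ bid - 1) := propext ⟨fun h => by omega, fun h => by omega⟩
  simp only [hiff]

-- ===== VERDICT (by name: the statement is the Claim_ definition above) =====
theorem getBookBefore_spec : Claim_equal_getBookBefore := by
  intro bid shelf _
  unfold Spec_getBookBefore getBookBefore getBookBefore_alt
  rw [filter_lt_eq, loop_eq_max]
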